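-- pv_equiv track=rewrite | github.com/openakita/openakita | src/openakita/channels/status.py | _best_runtime_status
-- ===== SOURCE A (Python) =====
-- from typing import Any
--
-- def _best_runtime_status(entries: list[dict[str, Any]]) -> str:
--     if not entries:
--         return "unknown"
--     if any(entry.get("status") == "online" for entry in entries):
--         return "online"
--     if any(entry.get("status") == "offline" for entry in entries):
--         return "offline"
--     return "unknown"
-- ===== SOURCE B (Python) =====
-- def _best_runtime_status(entries):
--     if not entries:
--         return "unknown"
--     ranks = {"online": 0, "offline": 1}
--     best = min(ranks.get(e.get("status"), 2) for e in entries)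
--     return "online" if best == 0 else ("offline" if best == 1 else "unknown")
-- ===== Notes on version B (the rewrite author's own statement) =====
-- stated objective: alternative
-- what changed: Replaces the two short-circuit any-scans with one pass that maps every entry to a priority rank (online=0, offline=1, other/missing=2), takes the minimum, and maps the best rank back to a status string.
import Mathlib
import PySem

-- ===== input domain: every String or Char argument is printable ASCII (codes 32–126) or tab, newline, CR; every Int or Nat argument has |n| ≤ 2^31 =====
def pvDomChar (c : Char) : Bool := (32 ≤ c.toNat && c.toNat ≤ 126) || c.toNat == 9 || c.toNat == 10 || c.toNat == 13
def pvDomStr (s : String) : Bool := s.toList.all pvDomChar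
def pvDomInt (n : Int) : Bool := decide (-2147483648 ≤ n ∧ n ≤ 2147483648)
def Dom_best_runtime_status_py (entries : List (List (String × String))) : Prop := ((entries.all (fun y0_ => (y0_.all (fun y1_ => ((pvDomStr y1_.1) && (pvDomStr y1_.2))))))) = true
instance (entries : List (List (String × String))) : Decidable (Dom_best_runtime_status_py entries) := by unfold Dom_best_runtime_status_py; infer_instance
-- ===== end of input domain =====

-- B replaces A's two short-circuit any-scans with one min-of-ranks pass; same O(n) cost, different decomposition.

-- entry.get("status") on the dict entry (each entry is a Python dict, carried as its item list)
def pvStatus (e : List (String × String)) : Option String :=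
  PySem.Dict.get? (PySem.Dict.ofList e) "status"

-- ===== PORT A =====
def best_runtime_status_py (entries : List (List (String × String))) : String :=
  if entries = [] then "unknown"
  else if entries.any (fun e => pvStatus e == some "online") then "online"
  else if entries.any (fun e => pvStatus e == some "offline") then "offline"
  else "unknown"

-- ===== PORT B =====
-- ranks.get(e.get("status"), 2) with ranks = {"online": 0, "offline": 1}
-- (the dict has string keys, so a None status never matches and falls to the default 2)
def pvRank (e : List (String × String)) : Nat :=
  match pvStatus e with
  | some s => PySem.Dict.getD (PySem.Dict.ofList [("online", 0), ("offline", 1)]) s 2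
  | none => 2

def best_runtime_status_py_alt (entries : List (List (String × String))) : String :=
  if entries = [] then "unknown"
  else
    match PySem.List.min? (entries.map pvRank) (fun x => x) with
    | some 0 => "online"
    | some 1 => "offline"
    | _ => "unknown"

-- ===== PRECONDITION & SPEC =====
def Spec_best_runtime_status_py (entries : List (List (String × String))) (out : String) : Prop := out = best_runtime_status_py_alt entries
instance (entries : List (List (String × String))) (out : String) : Decidable (Spec_best_runtime_status_py entries out) := by unfold Spec_best_runtime_status_py; infer_instance

-- ===== CLAIM (what is proved, stated in full; the proofs are below) =====
def Claim_equal_best_runtime_status_py : Prop := ∀ (entries : List (List (String × String))), Dom_best_runtime_status_py entries → Spec_best_runtime_status_py entries (best_runtime_status_py entries)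

-- ===== LEMMAS AND PROOFS =====

theorem pvRank_trichotomy (e : List (String × String)) :
    (pvRank e = 0 ∧ pvStatus e = some "online") ∨
    (pvRank e = 1 ∧ pvStatus e = some "offline") ∨
    (pvRank e = 2 ∧ pvStatus e ≠ some "online" ∧ pvStatus e ≠ some "offline") := by
  have hof : PySem.Dict.ofList [("online", (0 : Nat)), ("offline", 1)]
      = (PySem.Dict.empty.insert "online" 0).insert "offline" 1 := by decide
  unfold pvRank
  cases h : pvStatus e with
  | none => simp
  | some s =>
    simp only [hof, PySem.Dict.getD_insert, PySem.Dict.getD_empty]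
    by_cases hs : s = "online"
    · subst hs; left; simp
    · by_cases hs2 : s = "offline"
      · subst hs2; right; left; simp
      · right; right; simp [hs, hs2]

def pvR (l : List (List (String × String))) : Nat :=
  if l.any (fun e => pvStatus e == some "online") then 0
  else if l.any (fun e => pvStatus e == some "offline") then 1
  else 2

theorem pvR_cons (y : List (String × String)) (t : List (List (String × String))) :
    min (pvRank y) (pvR t) = pvR (y :: t) := by
  simp only [pvR, List.any_cons]
  rcases pvRank_trichotomy y with ⟨h, h'⟩ | ⟨h, h'⟩ | ⟨h, h1, h2⟩
  · simp only [h, h', beq_self_eq_true, Bool.true_or, if_true]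
    split_ifs <;> rfl
  · have e1 : (pvStatus y == some "online") = false := by simp [h']
    have e2 : (pvStatus y == some "offline") = true := by simp [h']
    simp only [h, e1, e2, Bool.false_or, Bool.true_or, if_true]
    split_ifs <;> rfl
  · simp only [h]
    have e1 : (pvStatus y == some "online") = false := by simp [h1]
    have e2 : (pvStatus y == some "offline") = false := by simp [h2]
    simp only [e1, e2, Bool.false_or]
    split_ifs <;> rfl

theorem pvRank_le (e : List (String × String)) : pvRank e ≤ 2 := by
  rcases pvRank_trichotomy e with ⟨h, _⟩ | ⟨h, _⟩ | ⟨h, _⟩ <;> omega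

theorem foldl_min_char (l : List (List (String × String))) (a : Nat) (ha : a ≤ 2) :
    (l.map pvRank).foldl min a = min a (pvR l) := by
  induction l generalizing a with
  | nil =>
    have h2 : pvR ([] : List (List (String × String))) = 2 := by decide
    simp [h2]; omega
  | cons y t ih =>
    simp only [List.map_cons, List.foldl_cons]
    have hy := pvRank_le y
    rw [ih (min a (pvRank y)) (by omega), Nat.min_assoc, pvR_cons]

theorem best_runtime_status_py_spec : Claim_equal_best_runtime_status_py := by
  intro entries _
  unfold Spec_best_runtime_status_py best_runtime_status_py best_runtime_status_py_alt
  cases entries with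
  | nil => simp
  | cons x t =>
    simp only [List.map_cons, reduceCtorEq, if_false]
    rw [PySem.List.min?_id_cons, foldl_min_char t (pvRank x) (pvRank_le x), pvR_cons]
    unfold pvR
    split_ifs <;> rfl
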